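-- pv_equiv track=rewrite | github.com/QAndersonWatson/ME5452025_MEQ | ParsingLidarData.py | build_crc8_table
-- ===== SOURCE A (Python) =====
-- def build_crc8_table(poly=0x1D):
--     tbl = []
--     for byte in range(256):
--         crc = byte
--         for _ in range(8):
--             crc = ((crc << 1) ^ poly) & 0xFF if (crc & 0x80) else (crc << 1) & 0xFF
--         tbl.append(crc)
--     return tbl
-- ===== SOURCE B (Python) =====
-- def build_crc8_table(poly=0x1D):
--     # CRC step is GF(2)-linear: precompute the images of the 8 unit bytes,
--     # then every table entry is the XOR of the basis images of its set bits.
--     basis = []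
--     for k in range(8):
--         v = 1 << k
--         for _ in range(8):
--             v = ((v << 1) ^ poly) & 0xFF if (v & 0x80) else (v << 1) & 0xFF
--         basis.append(v)
--     tbl = []
--     for byte in range(256):
--         acc = 0
--         for k in range(8):
--             if byte & (1 << k):
--                 acc ^= basis[k]
--         tbl.append(acc)
--     return tbl
-- ===== Notes on version B (the rewrite author's own statement) =====
-- stated objective: alternative
-- what changed: Instead of running the 8-round shift/xor loop for each of the 256 bytes, B exploits GF(2)-linearity of the CRC round: it runs the loop only for the 8 unit bytes (a basis) and builds each table entry as the XOR of the basis images of the byte's set bits.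
import Mathlib
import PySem

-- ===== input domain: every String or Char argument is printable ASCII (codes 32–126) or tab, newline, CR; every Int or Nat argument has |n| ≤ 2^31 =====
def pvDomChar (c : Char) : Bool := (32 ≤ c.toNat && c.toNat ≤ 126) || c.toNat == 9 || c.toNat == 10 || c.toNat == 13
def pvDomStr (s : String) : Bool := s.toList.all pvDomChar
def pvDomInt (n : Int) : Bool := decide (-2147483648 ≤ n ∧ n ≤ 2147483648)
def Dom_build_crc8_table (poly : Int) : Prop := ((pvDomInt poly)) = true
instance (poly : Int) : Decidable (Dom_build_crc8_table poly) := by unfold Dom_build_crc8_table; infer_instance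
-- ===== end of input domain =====

-- B replaces A's 8-round loop per byte by an 8-entry GF(2) basis (the images of the unit bytes) XOR-combined per byte — an alternative algorithm, not claimed faster.

-- ===== PORT A =====
-- the conditional-expression body of A's inner loop (the same round expression appears verbatim in both Pythons)
def crc8Round (poly crc : Int) : Int :=
  if PySem.Int.band crc 128 ≠ 0
  then PySem.Int.band (PySem.Int.bxor (crc <<< (1 : Int)) poly) 255
  else PySem.Int.band (crc <<< (1 : Int)) 255

def build_crc8_table (poly : Int) : List Int :=
  (PySem.List.pyRange 0 256 1).foldl
    (fun tbl byte =>
      tbl ++ [ (PySem.List.pyRange 0 8 1).foldl (fun crc _ => crc8Round poly crc) byte ])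
    []

-- ===== PORT B =====
def build_crc8_table_alt (poly : Int) : List Int :=
  let basis : List Int :=
    (PySem.List.pyRange 0 8 1).foldl
      (fun bs k =>
        bs ++ [ (PySem.List.pyRange 0 8 1).foldl (fun v _ => crc8Round poly v)
                  ((1 : Int) <<< k) ])
      []
  (PySem.List.pyRange 0 256 1).foldl
    (fun tbl byte =>
      tbl ++ [ (PySem.List.pyRange 0 8 1).foldl
        (fun acc k =>
          if PySem.Int.band byte ((1 : Int) <<< k) ≠ 0
          then PySem.Int.bxor acc (PySem.List.pyGetD basis k 0)   -- k ∈ [0,8) < len basis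
          else acc) 0 ])
    []

-- ===== PRECONDITION & SPEC =====
def Spec_build_crc8_table (poly : Int) (out : List Int) : Prop := out = build_crc8_table_alt poly
instance (poly : Int) (out : List Int) : Decidable (Spec_build_crc8_table poly out) := by unfold Spec_build_crc8_table; infer_instance

-- ===== CLAIM (what is proved, stated in full; the proofs are below) =====
def Claim_equal_build_crc8_table : Prop := ∀ (poly : Int), Dom_build_crc8_table poly → Spec_build_crc8_table poly (build_crc8_table poly)

-- ===== LEMMAS AND PROOFS =====

-- the low 8 bits of poly, as a Nat (the only part of poly the round can see under the 0xFF mask)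
def crcLo (p : Int) : Nat := (PySem.Int.band p 255).toNat

-- Nat shadows of one round, of the 8-round byte loop, and of B's basis
def natRound (q c : Nat) : Nat :=
  if c &&& 128 ≠ 0 then ((c <<< 1) ^^^ q) &&& 255 else (c <<< 1) &&& 255

def natCrc8 (q b : Nat) : Nat := (List.range 8).foldl (fun c _ => natRound q c) b

def natBasis (q : Nat) : List Nat := (List.range 8).map (fun k => natCrc8 q (1 <<< k))

set_option maxRecDepth 10000 in
theorem sub_mask (y : Nat) (hy : y < 256) : 255 - y = 255 ^^^ y := by
  have h : ∀ z < 256, 255 - z = 255 ^^^ z := by decide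
  exact h y hy

theorem int_one_shift (k : Nat) : (1 : Int) <<< ((k : Nat) : Int) = ((1 <<< k : Nat) : Int) := by
  rw [show ((1 : Int) <<< ((k : Nat) : Int)) = ((Nat.shiftLeft' false 1 k : Nat) : Int) from rfl,
      Nat.shiftLeft'_false]

theorem int_shift_one (c : Nat) : ((c : Nat) : Int) <<< (1 : Int) = ((c <<< 1 : Nat) : Int) := by
  rw [show (((c : Nat) : Int) <<< (1 : Int)) = ((Nat.shiftLeft' false c 1 : Nat) : Int) from rfl,
      Nat.shiftLeft'_false]

theorem mask_xor (p : Int) (m : Nat) :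
    PySem.Int.band (PySem.Int.bxor (m : Int) p) 255 = (((m ^^^ crcLo p) &&& 255 : Nat) : Int) := by
  rcases le_or_gt 0 p with hp | hp
  · obtain ⟨t, rfl⟩ := Int.eq_ofNat_of_zero_le hp
    have h1 : PySem.Int.bxor (m : Int) (t : Int) = ((m ^^^ t : Nat) : Int) :=
      PySem.Int.bxor_natCast m t
    have h2 : PySem.Int.band ((m ^^^ t : Nat) : Int) ((255 : Nat) : Int) = (((m ^^^ t) &&& 255 : Nat) : Int) :=
      PySem.Int.band_natCast _ _
    have h3 : crcLo (t : Int) = t &&& 255 := by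
      unfold crcLo
      have h4 := PySem.Int.band_natCast t 255; norm_num at h4; rw [h4]; simp
    norm_num at h2
    rw [h1, h2, h3]
    congr 1
    simp [Nat.and_xor_distrib_right]
  · -- p < 0: Python's infinite two's complement, via PySem's case-wise band/bxor
    set n := (-p - 1).toNat with hn
    have hxor : PySem.Int.bxor (m : Int) p = -((m ^^^ n : Nat) : Int) - 1 := by
      simp only [PySem.Int.bxor]
      rw [if_pos (Int.natCast_nonneg m), if_neg (by omega)]
      simp [hn]
    have hband : PySem.Int.band (-((m ^^^ n : Nat) : Int) - 1) 255 = ((255 - (255 &&& (m ^^^ n)) : Nat) : Int) := by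
      simp only [PySem.Int.band]
      rw [if_neg (by omega), if_pos (by norm_num)]
      have e1 : (-(-((m ^^^ n : Nat) : Int) - 1) - 1).toNat = m ^^^ n := by omega
      have e2 : ((255 : Int)).toNat = 255 := by decide
      rw [e1, e2]
    have hlo : crcLo p = 255 - (255 &&& n) := by
      unfold crcLo
      simp only [PySem.Int.band]
      rw [if_neg (by omega), if_pos (by norm_num)]
      have e2 : ((255 : Int)).toNat = 255 := by decide
      have e3 : (-p - 1).toNat = n := hn.symm
      rw [e2, e3]
      omega
    rw [hxor, hband, hlo]
    congr 1
    rw [sub_mask _ (by have := Nat.and_le_left (n := 255) (m := m ^^^ n); omega),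
        sub_mask _ (by have := Nat.and_le_left (n := 255) (m := n); omega)]
    have expand : (m ^^^ (255 ^^^ (255 &&& n))) &&& 255
        = (m &&& 255) ^^^ ((255 &&& 255) ^^^ ((255 &&& n) &&& 255)) := by
      simp [Nat.and_xor_distrib_right]
    rw [expand]
    have e4 : (255 &&& n) &&& 255 = 255 &&& n := by
      rw [Nat.and_comm 255 n, Nat.and_assoc, Nat.and_self]
    have e5 : (255 : Nat) &&& 255 = 255 := Nat.and_self 255
    rw [e4, e5, Nat.and_xor_distrib_left]
    rw [Nat.and_comm 255 m]
    simp [Nat.xor_left_comm]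

theorem round_bridge (poly : Int) (c : Nat) :
    crc8Round poly (c : Int) = ((natRound (crcLo poly) c : Nat) : Int) := by
  have hcond : PySem.Int.band (c : Int) 128 = ((c &&& 128 : Nat) : Int) := by
    have h := PySem.Int.band_natCast c 128; norm_num at h; exact h
  have hband : PySem.Int.band ((c <<< 1 : Nat) : Int) 255 = (((c <<< 1) &&& 255 : Nat) : Int) := by
    have h := PySem.Int.band_natCast (c <<< 1) 255; norm_num at h; exact h
  unfold crc8Round natRound
  rw [hcond, int_shift_one]
  by_cases h : c &&& 128 = 0
  · rw [if_neg (by simp [h]), if_neg (by simp [h]), hband]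
  · rw [if_pos (by exact_mod_cast h), if_pos h, mask_xor]

theorem crc8_bridge (poly : Int) (c : Nat) :
    (PySem.List.pyRange 0 8 1).foldl (fun crc _ => crc8Round poly crc) (c : Int)
      = ((natCrc8 (crcLo poly) c : Nat) : Int) := by
  have hr : PySem.List.pyRange 0 8 1 = [0,1,2,3,4,5,6,7] := by decide
  rw [hr]
  simp [natCrc8, show List.range 8 = [0,1,2,3,4,5,6,7] from rfl, List.foldl, round_bridge]

theorem hbit (c : Nat) : c &&& 128 ≠ 0 ↔ c.testBit 7 = true := by
  have h : c &&& 128 = (c.testBit 7).toNat * 128 := by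
    have h2 := Nat.and_two_pow c 7; norm_num at h2; exact h2
  rw [h]; cases hc : c.testBit 7 <;> simp

theorem natRound_linear (q x y : Nat) :
    natRound q (x ^^^ y) = natRound q x ^^^ natRound q y := by
  unfold natRound
  cases hx : x.testBit 7 <;> cases hy : y.testBit 7 <;>
    simp [hbit, Nat.testBit_xor, hx, hy, Nat.shiftLeft_xor_distrib,
      ← Nat.and_xor_distrib_right, Nat.xor_comm, Nat.xor_left_comm]

theorem natRound_zero (q : Nat) : natRound q 0 = 0 := by simp [natRound]

theorem natCrc8_zero (q : Nat) : natCrc8 q 0 = 0 := by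
  simp [natCrc8, show List.range 8 = [0,1,2,3,4,5,6,7] from rfl, List.foldl, natRound_zero]

theorem natCrc8_linear (q x y : Nat) :
    natCrc8 q (x ^^^ y) = natCrc8 q x ^^^ natCrc8 q y := by
  simp [natCrc8, show List.range 8 = [0,1,2,3,4,5,6,7] from rfl, List.foldl, natRound_linear]

theorem pow_mask_succ (n : Nat) : ((1 <<< n) - 1) ^^^ (1 <<< n) = (1 <<< (n+1)) - 1 := by
  simp only [Nat.shiftLeft_eq, one_mul]
  apply Nat.eq_of_testBit_eq
  intro i
  rw [Nat.testBit_xor, Nat.testBit_two_pow_sub_one, Nat.testBit_two_pow_sub_one, Nat.testBit_two_pow]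
  by_cases h1 : i < n <;> by_cases h2 : n = i <;> simp [h1, h2] <;> omega

theorem combine_eq (q b : Nat) (n : Nat) (hn : n ≤ 8) :
    (List.range n).foldl
      (fun acc k => if b &&& (1 <<< k) ≠ 0 then acc ^^^ (natBasis q).getD k 0 else acc) 0
      = natCrc8 q (b &&& ((1 <<< n) - 1)) := by
  induction n with
  | zero => simp [natCrc8_zero]
  | succ n ih =>
    rw [List.range_succ, List.foldl_append, ih (by omega)]
    simp only [List.foldl_cons, List.foldl_nil]
    have hgetD : (natBasis q).getD n 0 = natCrc8 q (1 <<< n) := by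
      unfold natBasis
      exact PySem.List.getD_map_range _ 8 n 0 (by omega)
    have hsplit : b &&& ((1 <<< (n+1)) - 1) = (b &&& ((1 <<< n) - 1)) ^^^ (b &&& (1 <<< n)) := by
      rw [← Nat.and_xor_distrib_left, pow_mask_succ]
    rw [hsplit, natCrc8_linear, hgetD]
    have hpow : b &&& (1 <<< n) = (b.testBit n).toNat * 2 ^ n := by
      rw [Nat.shiftLeft_eq, one_mul]; exact Nat.and_two_pow b n
    by_cases h : b.testBit n
    · rw [if_pos (by rw [hpow, h]; simp)]
      congr 1
      rw [hpow, h, Nat.shiftLeft_eq, one_mul]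
      simp
    · rw [if_neg (by simp [hpow, h])]
      rw [hpow]; simp [h, natCrc8_zero]

theorem combine_bridge (q : Nat) (basisI : List Int)
    (hb : basisI = (natBasis q).map (fun x : Nat => (x : Int)))
    (b : Nat) (l : List Nat) (hl : ∀ k ∈ l, k < 8) (acc : Nat) :
    (l.map (fun k : Nat => (k : Int))).foldl
      (fun acc k =>
        if PySem.Int.band (b : Int) ((1 : Int) <<< k) ≠ 0
        then PySem.Int.bxor acc (PySem.List.pyGetD basisI k 0)
        else acc) (acc : Int)
    = ((l.foldl (fun acc k => if b &&& (1 <<< k) ≠ 0 then acc ^^^ (natBasis q).getD k 0 else acc) acc : Nat) : Int) := by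
  induction l generalizing acc with
  | nil => simp
  | cons k l ih =>
    simp only [List.map_cons, List.foldl_cons]
    have hk : k < 8 := hl k (List.mem_cons_self)
    have hstep :
        (if PySem.Int.band (b : Int) ((1 : Int) <<< ((k : Nat) : Int)) ≠ 0
         then PySem.Int.bxor (acc : Int) (PySem.List.pyGetD basisI (k : Int) 0)
         else (acc : Int))
        = ((if b &&& (1 <<< k) ≠ 0 then acc ^^^ (natBasis q).getD k 0 else acc : Nat) : Int) := by
      have h2 : PySem.Int.band (b : Int) (((1 <<< k : Nat)) : Int) = (((b &&& (1 <<< k) : Nat)) : Int) :=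
        PySem.Int.band_natCast _ _
      have h3 : PySem.List.pyGetD basisI (k : Int) 0 = (((natBasis q).getD k 0 : Nat) : Int) := by
        rw [hb, PySem.List.pyGetD_natCast]
        have hlen : k < (natBasis q).length := by simp [natBasis]; omega
        rw [List.getD_eq_getElem _ _ (by simpa using hlen), List.getElem_map,
            List.getD_eq_getElem _ _ hlen]
      rw [int_one_shift, h2, h3]
      by_cases h : b &&& (1 <<< k) = 0
      · rw [if_neg (by simp [h]), if_neg (by simp [h])]
      · rw [if_pos (by exact_mod_cast h), if_pos h, PySem.Int.bxor_natCast]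
    rw [hstep, ih (fun x hx => hl x (List.mem_cons_of_mem _ hx))]

-- ===== VERDICT (by name: the statement is the Claim_ definition above) =====
theorem build_crc8_table_spec : Claim_equal_build_crc8_table := by
  intro poly _
  unfold Spec_build_crc8_table build_crc8_table build_crc8_table_alt
  have hr256 : PySem.List.pyRange 0 256 1 = (List.range 256).map (fun k : Nat => (k : Int)) := by
    have h := PySem.List.pyRange_zero_nat 256
    exact_mod_cast h
  have hr8 : PySem.List.pyRange 0 8 1 = (List.range 8).map (fun k : Nat => (k : Int)) := by decide
  have hbasis :
      (PySem.List.pyRange 0 8 1).foldl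
        (fun bs k =>
          bs ++ [ (PySem.List.pyRange 0 8 1).foldl (fun v _ => crc8Round poly v)
                    ((1 : Int) <<< k) ]) []
      = (natBasis (crcLo poly)).map (fun x : Nat => (x : Int)) := by
    rw [PySem.List.foldl_append_singleton_eq_map, hr8, List.map_map]
    unfold natBasis
    rw [List.map_map]
    refine List.map_congr_left (fun k _ => ?_)
    simp only [Function.comp_apply]
    rw [int_one_shift]
    exact crc8_bridge poly (1 <<< k)
  simp only [PySem.List.foldl_append_singleton_eq_map, hbasis, hr256, List.map_map,
    List.nil_append]
  refine List.map_congr_left (fun b hb => ?_)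
  have hblt : b < 256 := List.mem_range.mp hb
  simp only [Function.comp_apply]
  have hcb := combine_bridge (crcLo poly) ((natBasis (crcLo poly)).map (fun x : Nat => (x : Int)))
    rfl b (List.range 8) (fun k hk => List.mem_range.mp hk) 0
  have hnat : (List.range 8).foldl
      (fun acc k => if b &&& (1 <<< k) ≠ 0 then acc ^^^ (natBasis (crcLo poly)).getD k 0 else acc) 0
      = natCrc8 (crcLo poly) b := by
    rw [combine_eq _ b 8 le_rfl]
    congr 1
    rw [show ((1 <<< 8) - 1 : Nat) = 255 from rfl,
        show (255 : Nat) = 2 ^ 8 - 1 from rfl,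
        Nat.and_two_pow_sub_one_eq_mod]
    omega
  exact (crc8_bridge poly b).trans ((hcb.trans (congrArg _ hnat)).symm)
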